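-- pv_equiv track=rewrite | github.com/capsa-0/ddG_with_Boltz | src/ddg_predictor/data_prep/get_msas/mut_msa.py | map_query_position_to_alignment
-- ===== SOURCE A (Python) =====
-- def map_query_position_to_alignment(seq_with_gaps: str, query_pos: int):
--     """Map ungapped query position to aligned sequence position (1-based)."""
--     count = 0
--     for i, aa in enumerate(seq_with_gaps, start=1):
--         if aa.isupper():
--             count += 1
--             if count == query_pos:
--                 return i
--     raise ValueError(f"Query position {query_pos} exceeds sequence length.")
-- ===== SOURCE B (Python) =====
-- def map_query_position_to_alignment(seq_with_gaps: str, query_pos: int):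
--     """Map ungapped query position to aligned sequence position (1-based)."""
--     counts = []
--     total = 0
--     for aa in seq_with_gaps:
--         total += aa.isupper()
--         counts.append(total)
--     if query_pos < 1 or query_pos > total:
--         raise ValueError(f"Query position {query_pos} exceeds sequence length.")
--     lo, hi = 0, len(counts)
--     while lo < hi:
--         mid = (lo + hi) // 2
--         if counts[mid] < query_pos:
--             lo = mid + 1
--         else:
--             hi = mid
--     return lo + 1
-- ===== Notes on version B (the rewrite author's own statement) =====
-- stated objective: alternative
-- what changed: Replaces A's early-terminating counting scan with a cumulative prefix-count array plus a hand-written bisect_left binary search for the first prefix reaching query_pos.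
import Mathlib
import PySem

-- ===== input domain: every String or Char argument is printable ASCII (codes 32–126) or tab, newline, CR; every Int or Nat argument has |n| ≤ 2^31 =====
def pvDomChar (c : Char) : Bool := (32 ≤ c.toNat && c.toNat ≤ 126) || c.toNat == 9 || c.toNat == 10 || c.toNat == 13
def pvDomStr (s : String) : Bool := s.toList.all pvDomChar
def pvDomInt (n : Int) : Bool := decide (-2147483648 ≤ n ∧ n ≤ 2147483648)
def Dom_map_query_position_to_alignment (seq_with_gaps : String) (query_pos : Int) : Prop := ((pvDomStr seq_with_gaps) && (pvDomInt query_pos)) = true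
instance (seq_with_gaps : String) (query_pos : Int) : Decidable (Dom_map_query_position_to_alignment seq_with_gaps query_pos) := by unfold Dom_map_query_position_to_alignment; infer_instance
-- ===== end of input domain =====

-- B replaces A's early-terminating counting scan by a cumulative prefix-count array plus a
-- hand-written bisect_left binary search (objective: alternative, same O(n) build cost).
-- Both Pythons raise ValueError on out-of-range query_pos; those inputs are outside Pre_.

-- ===== PORT A =====
-- the for-loop of A: walks enumerate(seq, 1), counts uppercase, returns i when count hits query_pos;
-- the final 'raise ValueError' is modelled by 0 (excluded by Pre_)
def pvScanA (query_pos : Int) : List (Int × Char) → Int → Int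
  | [], _ => 0
  | (i, aa) :: rest, count =>
    if PySem.Chars.isupper aa then
      if count + 1 = query_pos then i else pvScanA query_pos rest (count + 1)
    else pvScanA query_pos rest count

def map_query_position_to_alignment (seq_with_gaps : String) (query_pos : Int) : Int :=
  pvScanA query_pos (PySem.List.enumerate seq_with_gaps.toList 1) 0

-- ===== PORT B =====
-- the first loop of B: builds the running prefix-count list and the final total
def pvBuildCounts : List Char → Int → (List Int × Int)
  | [], total => ([], total)
  | aa :: rest, total =>
    let t := total + (if PySem.Chars.isupper aa then 1 else 0)
    let r := pvBuildCounts rest t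
    (t :: r.1, r.2)

-- the while-loop of B: bisect_left; counts[mid] is in range throughout (0 ≤ lo ≤ mid < hi ≤ len),
-- so List.getD is exact for Python's counts[mid]
def pvBisect (counts : List Int) (q : Int) (lo hi : Nat) : Nat :=
  if _h : lo < hi then
    let mid := (lo + hi) / 2
    if counts.getD mid 0 < q then pvBisect counts q (mid + 1) hi
    else pvBisect counts q lo mid
  else lo
termination_by hi - lo
decreasing_by all_goals omega

def map_query_position_to_alignment_alt (seq_with_gaps : String) (query_pos : Int) : Int :=
  let r := pvBuildCounts seq_with_gaps.toList 0
  if query_pos < 1 ∨ query_pos > r.2 then 0   -- the raise branch (outside Pre_)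
  else (pvBisect r.1 query_pos 0 r.1.length : Int) + 1

-- ===== PRECONDITION & SPEC =====
-- Pre_ excludes exactly the inputs where the Python A raises ValueError:
-- query_pos must be between 1 and the number of uppercase characters.
def Pre_map_query_position_to_alignment (seq_with_gaps : String) (query_pos : Int) : Prop :=
  1 ≤ query_pos ∧ query_pos ≤ ((seq_with_gaps.toList.filter PySem.Chars.isupper).length : Int)
instance (seq_with_gaps : String) (query_pos : Int) : Decidable (Pre_map_query_position_to_alignment seq_with_gaps query_pos) := by unfold Pre_map_query_position_to_alignment; infer_instance

def pvWitness_map_query_position_to_alignment : String × Int := ("aB-C", 2)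

def Spec_map_query_position_to_alignment (seq_with_gaps : String) (query_pos : Int) (out : Int) : Prop := out = map_query_position_to_alignment_alt seq_with_gaps query_pos
instance (seq_with_gaps : String) (query_pos : Int) (out : Int) : Decidable (Spec_map_query_position_to_alignment seq_with_gaps query_pos out) := by unfold Spec_map_query_position_to_alignment; infer_instance

-- ===== CLAIM (what is proved, stated in full; the proofs are below) =====
def Claim_equal_map_query_position_to_alignment : Prop := ∀ (seq_with_gaps : String) (query_pos : Int), Dom_map_query_position_to_alignment seq_with_gaps query_pos → Pre_map_query_position_to_alignment seq_with_gaps query_pos → Spec_map_query_position_to_alignment seq_with_gaps query_pos (map_query_position_to_alignment seq_with_gaps query_pos)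

-- ===== LEMMAS AND PROOFS =====

-- 0-based index of the k-th (1-based) uppercase character: the common characterisation
def pvNthUp : List Char → Int → Option Nat
  | [], _ => none
  | aa :: rest, k =>
    if PySem.Chars.isupper aa then
      if k = 1 then some 0 else (pvNthUp rest (k - 1)).map (· + 1)
    else (pvNthUp rest k).map (· + 1)

theorem nthUp_exists (l : List Char) (k : Int) (h1 : 1 ≤ k)
    (h2 : k ≤ ((l.filter PySem.Chars.isupper).length : Int)) :
    ∃ j, pvNthUp l k = some j := by
  induction l generalizing k with
  | nil => simp at h2; omega
  | cons aa rest ih =>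
    by_cases hu : PySem.Chars.isupper aa
    · by_cases hk : k = 1
      · exact ⟨0, by simp [pvNthUp, hu, hk]⟩
      · have h2' : k - 1 ≤ ((rest.filter PySem.Chars.isupper).length : Int) := by
          simp [List.filter, hu] at h2; omega
        obtain ⟨j, hj⟩ := ih (k - 1) (by omega) h2'
        exact ⟨j + 1, by simp [pvNthUp, hu, hk, hj]⟩
    · have h2' : k ≤ ((rest.filter PySem.Chars.isupper).length : Int) := by
        simp [List.filter, hu] at h2; omega
      obtain ⟨j, hj⟩ := ih k h1 h2'
      exact ⟨j + 1, by simp [pvNthUp, hu, hj]⟩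

-- A's scan returns start-offset + the index of the (q - count)-th remaining uppercase
theorem scanA_eq (q : Int) (l : List Char) (s c : Int) (j : Nat)
    (hj : pvNthUp l (q - c) = some j) :
    pvScanA q (PySem.List.enumerate l s) c = s + (j : Int) := by
  induction l generalizing s c j with
  | nil => simp [pvNthUp] at hj
  | cons aa rest ih =>
    rw [PySem.List.enumerate_cons]
    by_cases hu : PySem.Chars.isupper aa
    · by_cases hk : q - c = 1
      · have : j = 0 := by simp [pvNthUp, hu, hk] at hj; omega
        subst this
        simp [pvScanA, hu, show c + 1 = q by omega]
      · rw [pvNthUp, if_pos hu, if_neg hk] at hj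
        obtain ⟨j', hj', hjj⟩ := Option.map_eq_some_iff.mp hj
        subst hjj
        have hc : ¬ (c + 1 = q) := by omega
        rw [pvScanA]
        simp only [hu, if_true, if_neg hc]
        rw [ih (s + 1) (c + 1) j' (by rw [show q - (c + 1) = q - c - 1 by omega]; exact hj')]
        push_cast; ring
    · rw [pvNthUp, if_neg hu] at hj
      obtain ⟨j', hj', hjj⟩ := Option.map_eq_some_iff.mp hj
      subst hjj
      rw [pvScanA]
      simp only [hu, if_false]
      rw [ih (s + 1) c j' hj']
      push_cast; ring

theorem buildCounts_length (l : List Char) (t : Int) :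
    (pvBuildCounts l t).1.length = l.length := by
  induction l generalizing t with
  | nil => simp [pvBuildCounts]
  | cons aa rest ih => simp [pvBuildCounts, ih]

theorem buildCounts_total (l : List Char) (t : Int) :
    (pvBuildCounts l t).2 = t + ((l.filter PySem.Chars.isupper).length : Int) := by
  induction l generalizing t with
  | nil => simp [pvBuildCounts]
  | cons aa rest ih =>
    by_cases hu : PySem.Chars.isupper aa
    · simp [pvBuildCounts, hu, ih]
      push_cast
      ring
    · simp [pvBuildCounts, hu, ih]

theorem buildCounts_getD (l : List Char) (t : Int) (i : Nat) (hi : i < l.length) :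
    (pvBuildCounts l t).1.getD i 0
      = t + (((l.take (i + 1)).filter PySem.Chars.isupper).length : Int) := by
  induction l generalizing t i with
  | nil => simp at hi
  | cons aa rest ih =>
    cases i with
    | zero =>
      by_cases hu : PySem.Chars.isupper aa <;> simp [pvBuildCounts, List.filter, hu]
    | succ i' =>
      have hi' : i' < rest.length := by simpa using hi
      rw [show pvBuildCounts (aa :: rest) t
            = ((t + (if PySem.Chars.isupper aa then 1 else 0)) ::
                (pvBuildCounts rest (t + (if PySem.Chars.isupper aa then 1 else 0))).1,
               (pvBuildCounts rest (t + (if PySem.Chars.isupper aa then 1 else 0))).2) from rfl]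
      rw [List.getD_cons_succ, ih _ i' hi']
      by_cases hu : PySem.Chars.isupper aa
      · simp [List.take_succ_cons, hu]
        push_cast
        omega
      · simp [List.take_succ_cons, hu]

-- the two pointwise facts the binary search needs, from the nthUp characterisation
theorem nthUp_prefix (l : List Char) (k : Int) (j : Nat) (h1 : 1 ≤ k)
    (hj : pvNthUp l k = some j) :
    j < l.length ∧
    (((l.take (j + 1)).filter PySem.Chars.isupper).length : Int) = k ∧
    (((l.take j).filter PySem.Chars.isupper).length : Int) = k - 1 := by
  induction l generalizing k j with
  | nil => simp [pvNthUp] at hj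
  | cons aa rest ih =>
    by_cases hu : PySem.Chars.isupper aa
    · by_cases hk : k = 1
      · have : j = 0 := by simp [pvNthUp, hu, hk] at hj; omega
        subst this
        simp [List.filter, hu, hk]
      · rw [pvNthUp, if_pos hu, if_neg hk] at hj
        obtain ⟨j', hj', hjj⟩ := Option.map_eq_some_iff.mp hj
        subst hjj
        obtain ⟨hl, he, he'⟩ := ih (k - 1) j' (by omega) hj'
        refine ⟨by simpa using hl, ?_, ?_⟩
        · simp [List.take_succ_cons, hu]
          push_cast
          omega
        · simp [List.take_succ_cons, hu]
          push_cast
          omega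
    · rw [pvNthUp, if_neg hu] at hj
      obtain ⟨j', hj', hjj⟩ := Option.map_eq_some_iff.mp hj
      subst hjj
      obtain ⟨hl, he, he'⟩ := ih k j' h1 hj'
      refine ⟨by simpa using hl, ?_, ?_⟩ <;>
        simp [List.take_succ_cons, hu, he, he']

theorem takeCount_mono (l : List Char) (a b : Nat) (hab : a ≤ b) :
    ((l.take a).filter PySem.Chars.isupper).length ≤ ((l.take b).filter PySem.Chars.isupper).length :=
  ((List.take_sublist_take_left hab).filter _).length_le

theorem bisect_correct (counts : List Int) (q : Int) (j : Nat)
    (hlow : ∀ i : Nat, i < j → counts.getD i 0 < q)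
    (hhigh : ∀ i : Nat, j ≤ i → i < counts.length → q ≤ counts.getD i 0) :
    ∀ lo hi : Nat, lo ≤ j → j ≤ hi → hi ≤ counts.length → pvBisect counts q lo hi = j := by
  intro lo hi
  induction hlo : hi - lo using Nat.strong_induction_on generalizing lo hi with
  | _ d ih =>
    intro h1 h2 h3
    rw [pvBisect]
    by_cases hlt : lo < hi
    · rw [dif_pos hlt]
      set mid := (lo + hi) / 2 with hmid
      have hm1 : lo ≤ mid := by omega
      have hm2 : mid < hi := by omega
      by_cases hc : counts.getD mid 0 < q
      · have hmj : mid < j := by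
          by_contra hn
          exact absurd (hhigh mid (by omega) (by omega)) (by omega)
        rw [if_pos hc]
        exact ih (hi - (mid + 1)) (by omega) (mid + 1) hi rfl (by omega) h2 h3
      · have hjm : j ≤ mid := by
          by_contra hn
          exact absurd (hlow mid (by omega)) (by omega)
        rw [if_neg hc]
        exact ih (mid - lo) (by omega) lo mid rfl h1 hjm (by omega)
    · rw [dif_neg hlt]; omega

-- ===== VERDICT (by name: the statement is the Claim_ definition above) =====
theorem map_query_position_to_alignment_spec : Claim_equal_map_query_position_to_alignment := by
  intro s q _ hpre
  obtain ⟨h1, h2⟩ := hpre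
  obtain ⟨j, hj⟩ := nthUp_exists s.toList q h1 h2
  obtain ⟨hjlt, heq, heq'⟩ := nthUp_prefix s.toList q j h1 hj
  unfold Spec_map_query_position_to_alignment map_query_position_to_alignment map_query_position_to_alignment_alt
  have htot := buildCounts_total s.toList 0
  have hlen := buildCounts_length s.toList 0
  have hguard : ¬ (q < 1 ∨ q > (pvBuildCounts s.toList 0).2) := by rw [htot]; omega
  rw [scanA_eq q s.toList 1 0 j (by rw [show q - 0 = q by omega]; exact hj)]
  rw [if_neg hguard]
  have hbis : pvBisect (pvBuildCounts s.toList 0).1 q 0 (pvBuildCounts s.toList 0).1.length = j := by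
    apply bisect_correct
    · intro i hij
      rw [buildCounts_getD s.toList 0 i (by omega)]
      have hmono := takeCount_mono s.toList (i + 1) j (by omega)
      omega
    · intro i hji hilen
      rw [buildCounts_getD s.toList 0 i (by rw [hlen] at hilen; omega)]
      have hmono := takeCount_mono s.toList (j + 1) (i + 1) (by omega)
      omega
    · omega
    · omega
    · omega
  rw [hbis]; ring
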